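-- pv_equiv track=rewrite | github.com/deliceng665-svg/server-parts-price-comparator | backend/app_v2.py | _parse_brave
-- ===== SOURCE A (Python) =====
-- def _parse_brave(text):
--     items, cur = [], {}
--     for line in text.split('\n'):
--         line = line.strip()
--         if line.startswith('--- Result'):
--             if cur: items.append(cur)
--             cur = {}
--         elif line.startswith('Title:'):   cur['title']   = line[6:].strip()
--         elif line.startswith('Link:'):    cur['url']     = line[5:].strip()
--         elif line.startswith('Snippet:'): cur['snippet'] = line[8:].strip()
--     if cur: items.append(cur)
--     return items
-- ===== SOURCE B (Python) =====
-- _TABLE = {'Title:': ('title', 6), 'Link:': ('url', 5), 'Snippet:': ('snippet', 8)}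
--
-- def _parse_brave(text):
--     # Pass 1: group stripped lines into blocks, starting a new block at each '--- Result' marker.
--     blocks = [[]]
--     for raw in text.split('\n'):
--         line = raw.strip()
--         if line.startswith('--- Result'):
--             blocks.append([])
--         else:
--             blocks[-1].append(line)
--     # Pass 2: convert each block into a dict via the prefix table; keep non-empty dicts only.
--     out = []
--     for block in blocks:
--         rec = {}
--         for line in block:
--             for prefix, (key, off) in _TABLE.items():
--                 if line.startswith(prefix):
--                     rec[key] = line[off:].strip()
--         if rec:
--             out.append(rec)
--     return out
-- ===== Notes on version B (the rewrite author's own statement) =====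
-- stated objective: alternative
-- what changed: Replaces the single-pass interleaved elif state machine with a two-phase decomposition: first group stripped lines into record blocks at '--- Result' markers, then convert each block to a dict via a prefix->(key,offset) table and keep the non-empty ones.
import Mathlib
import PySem

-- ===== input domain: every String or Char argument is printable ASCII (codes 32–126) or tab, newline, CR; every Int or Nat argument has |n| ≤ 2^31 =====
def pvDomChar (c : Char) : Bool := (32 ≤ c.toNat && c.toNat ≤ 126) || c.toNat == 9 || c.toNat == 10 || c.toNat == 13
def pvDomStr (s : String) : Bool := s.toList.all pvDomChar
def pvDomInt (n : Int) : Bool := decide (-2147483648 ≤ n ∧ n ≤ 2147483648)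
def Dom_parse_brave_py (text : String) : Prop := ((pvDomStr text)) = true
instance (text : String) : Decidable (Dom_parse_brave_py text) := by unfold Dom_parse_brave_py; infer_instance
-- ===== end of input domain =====

-- B groups lines into blocks first and converts blocks afterwards; A is a one-pass state machine.

-- ===== PORT A =====
-- one iteration of A's for-loop: state = (items, cur)
def pvAStep (st : List (List (String × String)) × PySem.Dict String String) (line0 : String) :
    List (List (String × String)) × PySem.Dict String String :=
  let line := PySem.Str.strip line0
  if PySem.Str.startswith line "--- Result" then
    ((if st.2.items = [] then st.1 else st.1 ++ [st.2.items]), PySem.Dict.empty)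
  else if PySem.Str.startswith line "Title:" then
    (st.1, st.2.insert "title" (PySem.Str.strip (PySem.Str.slice line (some 6) none)))
  else if PySem.Str.startswith line "Link:" then
    (st.1, st.2.insert "url" (PySem.Str.strip (PySem.Str.slice line (some 5) none)))
  else if PySem.Str.startswith line "Snippet:" then
    (st.1, st.2.insert "snippet" (PySem.Str.strip (PySem.Str.slice line (some 8) none)))
  else st

def parse_brave_py (text : String) : List (List (String × String)) :=
  let st := (((PySem.Str.split? text "\n").getD [])).foldl pvAStep ([], PySem.Dict.empty)
  if st.2.items = [] then st.1 else st.1 ++ [st.2.items]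

-- ===== PORT B =====
def pvTable : List (String × String × Int) :=
  [("Title:", ("title", 6)), ("Link:", ("url", 5)), ("Snippet:", ("snippet", 8))]

-- pass 1: grouping step; state = (finished blocks, current block)
def pvBStep (st : List (List String) × List String) (raw : String) :
    List (List String) × List String :=
  let line := PySem.Str.strip raw
  if PySem.Str.startswith line "--- Result" then (st.1 ++ [st.2], [])
  else (st.1, st.2 ++ [line])

-- pass 2, inner loop over the table for one line
def pvLineStep (rec : PySem.Dict String String) (line : String) : PySem.Dict String String :=
  pvTable.foldl
    (fun rec e =>
      if PySem.Str.startswith line e.1 then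
        rec.insert e.2.1 (PySem.Str.strip (PySem.Str.slice line (some e.2.2) none))
      else rec)
    rec

def pvRecord (block : List String) : List (String × String) :=
  (block.foldl pvLineStep PySem.Dict.empty).items

def parse_brave_py_alt (text : String) : List (List (String × String)) :=
  let g := (((PySem.Str.split? text "\n").getD [])).foldl pvBStep ([], [])
  ((g.1 ++ [g.2]).map pvRecord).filter (fun r => ¬ r = [])

-- ===== PRECONDITION & SPEC =====
def Spec_parse_brave_py (text : String) (out : List (List (String × String))) : Prop := out = parse_brave_py_alt text
instance (text : String) (out : List (List (String × String))) : Decidable (Spec_parse_brave_py text out) := by unfold Spec_parse_brave_py; infer_instance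

-- ===== CLAIM (what is proved, stated in full; the proofs are below) =====
def Claim_equal_parse_brave_py : Prop := ∀ (text : String), Dom_parse_brave_py text → Spec_parse_brave_py text (parse_brave_py text)

-- ===== LEMMAS AND PROOFS =====

-- a stripped line matches at most one of the three prefixes, so B's table fold equals A's elif chain
lemma lineStep_eq_chain (d : PySem.Dict String String) (line : String) :
    pvLineStep d line =
      (if PySem.Str.startswith line "Title:" then
        d.insert "title" (PySem.Str.strip (PySem.Str.slice line (some 6) none))
      else if PySem.Str.startswith line "Link:" then
        d.insert "url" (PySem.Str.strip (PySem.Str.slice line (some 5) none))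
      else if PySem.Str.startswith line "Snippet:" then
        d.insert "snippet" (PySem.Str.strip (PySem.Str.slice line (some 8) none))
      else d) := by
  have excl : ∀ p q : List Char, ¬ p <+: q → ¬ q <+: p →
      PySem.Chars.startswith line.toList p = true →
      PySem.Chars.startswith line.toList q = false := by
    intro p q hpq hqp h
    cases hq : PySem.Chars.startswith line.toList q
    · rfl
    · rcases List.prefix_or_prefix_of_prefix ((PySem.Chars.startswith_iff _ p).mp h)
        ((PySem.Chars.startswith_iff _ q).mp hq) with h' | h'
      · exact absurd h' hpq
      · exact absurd h' hqp
  simp only [pvLineStep, pvTable, List.foldl_cons, List.foldl_nil, PySem.Str.startswith_eq]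
  by_cases ht : PySem.Chars.startswith line.toList ['T','i','t','l','e',':'] = true
  · have h1 := excl _ ['L','i','n','k',':'] (by decide) (by decide) ht
    have h2 := excl _ ['S','n','i','p','p','e','t',':'] (by decide) (by decide) ht
    simp [ht, h1, h2]
  · by_cases hl : PySem.Chars.startswith line.toList ['L','i','n','k',':'] = true
    · have h2 := excl _ ['S','n','i','p','p','e','t',':'] (by decide) (by decide) hl
      simp [ht, hl, h2]
    · by_cases hs : PySem.Chars.startswith line.toList ['S','n','i','p','p','e','t',':'] = true
      · simp [ht, hl, hs]
      · simp [ht, hl, hs]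

lemma record_append (block : List String) (l : String) :
    (block ++ [l]).foldl pvLineStep PySem.Dict.empty =
      pvLineStep (block.foldl pvLineStep PySem.Dict.empty) l := by
  simp [List.foldl_append]

-- the fold invariant relating A's state to B's grouping state
lemma invariant (lines : List String) (done : List (List String)) (cur : List String) :
    lines.foldl pvAStep
        ((done.map pvRecord).filter (fun r => ¬ r = []), cur.foldl pvLineStep PySem.Dict.empty)
      = (let g := lines.foldl pvBStep (done, cur)
         ((g.1.map pvRecord).filter (fun r => ¬ r = []), g.2.foldl pvLineStep PySem.Dict.empty)) := by
  induction lines generalizing done cur with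
  | nil => rfl
  | cons l ls ih =>
    simp only [List.foldl_cons]
    by_cases hm : PySem.Str.startswith (PySem.Str.strip l) "--- Result" = true
    · have hA : pvAStep ((done.map pvRecord).filter (fun r => ¬ r = []),
          cur.foldl pvLineStep PySem.Dict.empty) l
          = (((done ++ [cur]).map pvRecord).filter (fun r => ¬ r = []),
             List.foldl pvLineStep PySem.Dict.empty []) := by
        simp only [pvAStep, hm, if_true, List.map_append, List.filter_append, List.foldl_nil]
        by_cases h2 : (cur.foldl pvLineStep PySem.Dict.empty).items = [] <;>
          simp [List.filter, pvRecord, h2]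
      rw [hA, ih (done ++ [cur]) []]
      have hm' : PySem.Chars.startswith (PySem.Chars.strip l.toList)
          ['-', '-', '-', ' ', 'R', 'e', 's', 'u', 'l', 't'] = true := by simpa using hm
      simp [pvBStep, hm']
    · have hA : pvAStep ((done.map pvRecord).filter (fun r => ¬ r = []),
          cur.foldl pvLineStep PySem.Dict.empty) l
          = ((done.map pvRecord).filter (fun r => ¬ r = []),
             (cur ++ [PySem.Str.strip l]).foldl pvLineStep PySem.Dict.empty) := by
        rw [record_append, lineStep_eq_chain]
        simp only [pvAStep, hm, if_false, Bool.false_eq_true]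
        split_ifs <;> rfl
      rw [hA, ih done (cur ++ [PySem.Str.strip l])]
      have hm' : ¬ PySem.Chars.startswith (PySem.Chars.strip l.toList)
          ['-', '-', '-', ' ', 'R', 'e', 's', 'u', 'l', 't'] = true := by simpa using hm
      simp [pvBStep, hm']

-- ===== VERDICT (by name: the statement is the Claim_ definition above) =====
theorem parse_brave_py_spec : Claim_equal_parse_brave_py := by
  intro text _
  unfold Spec_parse_brave_py parse_brave_py parse_brave_py_alt
  have h := invariant (((PySem.Str.split? text "\n").getD [])) [] []
  simp only [List.map_nil, List.filter_nil, List.foldl_nil] at h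
  rw [h]
  by_cases h2 : (List.foldl pvLineStep PySem.Dict.empty
      (List.foldl pvBStep ([], []) ((PySem.Str.split? text "\n").getD [])).2).items = [] <;>
    simp [List.filter_append, List.filter, pvRecord, h2]
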